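-- pv_equiv track=rewrite | github.com/AndresRestrepoRodriguez/Emotional_Time_Series | graph/graphics_processing.py | get_summary_group_lessons_results
-- ===== SOURCE A (Python) =====
-- from collections import Counter
-- import collections, functools, operator
--
-- class Counter_tweaked(Counter):
--     def __add__(self, other):
--         if not isinstance(other, Counter):
--             return NotImplemented
--         result = Counter_tweaked()
--         for elem, count in self.items():
--             newcount = count + other[elem]
--             result[elem] = newcount
--         for elem, count in other.items():
--             if elem not in self:
--                 result[elem] = count
--         return result
--
-- def get_sum_array_dicts(array_dict):
--     result = dict(functools.reduce(operator.add,
--                                    map(Counter_tweaked, array_dict)))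
--     return result
--
-- def get_summary_group_lessons_results(grouped_group_lesson_results):
--     summary_group_lesson_results = grouped_group_lesson_results.copy()
--     for key_lesson in summary_group_lesson_results.keys():
--         lesson_filter_data = summary_group_lesson_results[key_lesson]
--         for key_actitity in lesson_filter_data.keys():
--             array_dict_results = summary_group_lesson_results[key_lesson][key_actitity]
--             summary_group_lesson_results[key_lesson][key_actitity] = get_sum_array_dicts(array_dict_results)
--     return summary_group_lesson_results
-- ===== SOURCE B (Python) =====
-- def get_summary_group_lessons_results(grouped_group_lesson_results):
--     summary_group_lesson_results = grouped_group_lesson_results.copy()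
--     for lesson_data in summary_group_lesson_results.values():
--         for key_activity in lesson_data:
--             dicts = lesson_data[key_activity]
--             key_order = {key: None for d in dicts for key in d}
--             lesson_data[key_activity] = {key: sum(d.get(key, 0) for d in dicts)
--                                          for key in key_order}
--     return summary_group_lesson_results
-- ===== Notes on version B (the rewrite author's own statement) =====
-- stated objective: alternative
-- what changed: get_sum_array_dicts's left fold of a custom Counter __add__ over the list of dicts is replaced by a key-indexed transpose: collect the keys in first-occurrence order, then sum d.get(key, 0) per key across all dicts in one comprehension.
import Mathlib
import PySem

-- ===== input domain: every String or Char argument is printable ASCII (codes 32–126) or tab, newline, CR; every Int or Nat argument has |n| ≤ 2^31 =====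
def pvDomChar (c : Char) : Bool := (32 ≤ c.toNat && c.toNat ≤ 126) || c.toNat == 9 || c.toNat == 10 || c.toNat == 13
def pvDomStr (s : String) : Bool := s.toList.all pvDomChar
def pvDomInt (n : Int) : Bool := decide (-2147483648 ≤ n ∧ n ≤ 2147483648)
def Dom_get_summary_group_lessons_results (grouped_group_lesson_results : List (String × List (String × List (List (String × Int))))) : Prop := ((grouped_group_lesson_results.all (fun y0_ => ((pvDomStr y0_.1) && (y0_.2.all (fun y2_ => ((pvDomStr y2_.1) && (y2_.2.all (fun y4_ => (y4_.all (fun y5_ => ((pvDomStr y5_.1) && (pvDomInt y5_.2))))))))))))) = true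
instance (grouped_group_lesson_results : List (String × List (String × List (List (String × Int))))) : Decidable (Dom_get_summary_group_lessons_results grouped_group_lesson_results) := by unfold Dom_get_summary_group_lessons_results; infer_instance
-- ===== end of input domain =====

-- B replaces A's fold of a custom Counter __add__ by a key-indexed transpose (keys in first-occurrence
-- order, then one sum per key); equivalence is about the RETURN value (in Python both A and B mutate the
-- shared inner dicts of the shallow copy in the same way).

-- shared input plumbing (not part of either algorithm): the association lists of the type convention
-- denote Python dicts, so duplicate keys collapse with dict(pairs) semantics (last value, first position)
def pvDictOf {ν : Type} (pairs : List (String × ν)) : PySem.Dict String ν :=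
  pairs.foldl (fun d p => d.insert p.1 p.2) PySem.Dict.empty

def pvNormInput (g : List (String × List (String × List (List (String × Int))))) :
    PySem.Dict String (PySem.Dict String (List (PySem.Dict String Int))) :=
  pvDictOf (g.map (fun p => (p.1, pvDictOf (p.2.map (fun q => (q.1, q.2.map pvDictOf))))))

-- ===== PORT A =====
-- Counter_tweaked.__add__: rebuild self's entries adding other[elem], then append other's new keys
def pvCounterAdd (self other : PySem.Dict String Int) : PySem.Dict String Int :=
  let r := self.items.foldl (fun r kv => r.insert kv.1 (kv.2 + other.getD kv.1 0)) PySem.Dict.empty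
  other.items.foldl (fun r kv => if self.contains kv.1 then r else r.insert kv.1 kv.2) r

-- get_sum_array_dicts: functools.reduce(operator.add, map(Counter_tweaked, array_dict));
-- on [] Python's reduce raises TypeError — excluded by Pre_, the empty-dict default only totalizes
def pvSumArrayDicts (array_dict : List (PySem.Dict String Int)) : PySem.Dict String Int :=
  match array_dict with
  | [] => PySem.Dict.empty
  | c :: cs => cs.foldl pvCounterAdd c

def get_summary_group_lessons_results (grouped_group_lesson_results : List (String × List (String × List (List (String × Int))))) : List (String × List (String × List (String × Int))) :=
  (pvNormInput grouped_group_lesson_results).items.map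
    (fun p => (p.1, p.2.items.map (fun q => (q.1, (pvSumArrayDicts q.2).items))))

-- ===== PORT B =====
-- keys in first-occurrence order across all dicts ({k: None for d in dicts for k in d})
def pvColKeys (dicts : List (PySem.Dict String Int)) : List String :=
  PySem.List.dedup (dicts.flatMap PySem.Dict.keys)

-- the transpose: one column sum per key ({key: sum(d.get(key, 0) for d in dicts) for key in key_order})
def pvKeySums (dicts : List (PySem.Dict String Int)) : List (String × Int) :=
  (pvColKeys dicts).map (fun k => (k, (dicts.map (fun d => d.getD k 0)).sum))

def get_summary_group_lessons_results_alt (grouped_group_lesson_results : List (String × List (String × List (List (String × Int))))) : List (String × List (String × List (String × Int))) :=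
  (pvNormInput grouped_group_lesson_results).items.map
    (fun p => (p.1, p.2.items.map (fun q => (q.1, pvKeySums q.2))))

-- ===== PRECONDITION & SPEC =====
-- Pre_ excludes exactly the inputs where Python A raises: some activity (after dict collapsing of
-- duplicate keys) maps to an EMPTY list of dicts, on which functools.reduce raises TypeError (B returns {} there).
def Pre_get_summary_group_lessons_results (grouped_group_lesson_results : List (String × List (String × List (List (String × Int))))) : Prop :=
  ((pvNormInput grouped_group_lesson_results).values.all
    (fun d => d.values.all (fun ads => !ads.isEmpty))) = true
instance (grouped_group_lesson_results : List (String × List (String × List (List (String × Int))))) : Decidable (Pre_get_summary_group_lessons_results grouped_group_lesson_results) := by unfold Pre_get_summary_group_lessons_results; infer_instance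

def pvWitness_get_summary_group_lessons_results : (List (String × List (String × List (List (String × Int))))) :=
  [("lesson1", [("act1", [[("joy", 2), ("fear", 1)], [("joy", 1)]])])]

def Spec_get_summary_group_lessons_results (grouped_group_lesson_results : List (String × List (String × List (List (String × Int))))) (out : List (String × List (String × List (String × Int)))) : Prop := out = get_summary_group_lessons_results_alt grouped_group_lesson_results
instance (grouped_group_lesson_results : List (String × List (String × List (List (String × Int))))) (out : List (String × List (String × List (String × Int)))) : Decidable (Spec_get_summary_group_lessons_results grouped_group_lesson_results out) := by unfold Spec_get_summary_group_lessons_results; infer_instance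

-- ===== CLAIM (what is proved, stated in full; the proofs are below) =====
def Claim_equal_get_summary_group_lessons_results : Prop := ∀ (grouped_group_lesson_results : List (String × List (String × List (List (String × Int))))), Dom_get_summary_group_lessons_results grouped_group_lesson_results → Pre_get_summary_group_lessons_results grouped_group_lesson_results → Spec_get_summary_group_lessons_results grouped_group_lesson_results (get_summary_group_lessons_results grouped_group_lesson_results)


-- ===== LEMMAS AND PROOFS =====

-- provenance: a value of dict(pairs) is the second component of one of the pairs
theorem mem_values_foldl_insert {ν : Type} (L : List (String × ν)) (d0 : PySem.Dict String ν)
    (v : ν) (h : v ∈ (L.foldl (fun d p => d.insert p.1 p.2) d0).values) :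
    v ∈ d0.values ∨ ∃ p ∈ L, v = p.2 := by
  induction L generalizing d0 with
  | nil => exact Or.inl h
  | cons p ps ih =>
    rcases ih _ h with h' | ⟨q, hq, rfl⟩
    · rcases PySem.Dict.mem_values_insert _ _ _ _ h' with rfl | h''
      · exact Or.inr ⟨p, by simp⟩
      · exact Or.inl h''
    · exact Or.inr ⟨q, by simp [hq]⟩

theorem nodup_keys_pvDictOf {ν : Type} (L : List (String × ν)) : (pvDictOf L).keys.Nodup :=
  PySem.Dict.nodup_keys_foldl_insert_key L (·.1) (fun _ p => p.2) PySem.Dict.empty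
    PySem.Dict.nodup_keys_empty

theorem nodup_inner (g : List (String × List (String × List (List (String × Int)))))
    (p : String × PySem.Dict String (List (PySem.Dict String Int)))
    (hp : p ∈ (pvNormInput g).items)
    (q : String × List (PySem.Dict String Int)) (hq : q ∈ p.2.items)
    (d : PySem.Dict String Int) (hd : d ∈ q.2) : d.keys.Nodup := by
  have h1 : p.2 ∈ (pvNormInput g).values := by
    simp only [PySem.Dict.values]; exact List.mem_map_of_mem hp
  rcases mem_values_foldl_insert _ _ _ h1 with h | ⟨r, hr, hpe⟩
  · simp [PySem.Dict.empty, PySem.Dict.values] at h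
  · obtain ⟨r0, _, rfl⟩ := List.mem_map.1 hr
    have h2 : q.2 ∈ (pvDictOf (r0.2.map (fun q => (q.1, q.2.map pvDictOf)))).values := by
      rw [hpe] at hq
      simp only [PySem.Dict.values]; exact List.mem_map_of_mem hq
    rcases mem_values_foldl_insert _ _ _ h2 with h | ⟨s0, hs, hqe⟩
    · simp [PySem.Dict.empty, PySem.Dict.values] at h
    · obtain ⟨s1, _, rfl⟩ := List.mem_map.1 hs
      rw [hqe] at hd
      obtain ⟨raw, _, rfl⟩ := List.mem_map.1 hd
      exact nodup_keys_pvDictOf raw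

-- the column sum of a key that occurs in no dict is 0
theorem colSum_eq_zero (ps : List (PySem.Dict String Int)) (k : String)
    (h : k ∉ ps.flatMap PySem.Dict.keys) :
    (ps.map (fun d => d.getD k 0)).sum = 0 := by
  apply List.sum_eq_zero
  intro x hx
  obtain ⟨d, hd, rfl⟩ := List.mem_map.1 hx
  have hk : k ∉ d.keys := fun hk => h (List.mem_flatMap.2 ⟨d, hd, hk⟩)
  exact PySem.Dict.getD_of_not_contains d 0
    (by rw [PySem.Dict.contains_eq_decide_mem_keys]; simpa using hk)

-- Counter_tweaked.__add__'s second loop: conditional inserts of fresh distinct keys append the kept pairs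
theorem foldl_cond_insert (a : PySem.Dict String Int) (P : List (String × Int)) :
    ∀ (r : PySem.Dict String Int), (P.map (·.1)).Nodup →
      (∀ p ∈ P, a.contains p.1 = false → r.contains p.1 = false) →
      (P.foldl (fun r kv => if a.contains kv.1 then r else r.insert kv.1 kv.2) r).items
        = r.items ++ P.filter (fun p => !a.contains p.1) := by
  induction P with
  | nil => intro r _ _; simp
  | cons p ps ih =>
    intro r hnd hc
    simp only [List.map_cons, List.nodup_cons] at hnd
    simp only [List.foldl_cons]
    by_cases h : a.contains p.1 = true
    · rw [if_pos h, ih r hnd.2 (fun q hq => hc q (List.mem_cons_of_mem _ hq))]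
      simp [h]
    · have hr : r.contains p.1 = false := hc p (List.mem_cons_self ..) (by simpa using h)
      rw [if_neg h, ih (r.insert p.1 p.2) hnd.2 ?_]
      · rw [PySem.Dict.items_insert_of_not_contains _ _ hr]
        simp [h]
      · intro q hq hcq
        rw [PySem.Dict.contains_insert]
        have hne : q.1 ≠ p.1 := by
          intro he
          exact hnd.1 (he ▸ List.mem_map_of_mem (f := (·.1)) hq)
        simp [hne, hc q (List.mem_cons_of_mem _ hq) hcq]

-- one step of A's reduce, characterised against B's transpose
theorem counterAdd_items (acc d : PySem.Dict String Int) (ps : List (PySem.Dict String Int))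
    (hd : d.keys.Nodup) (hacc : acc.items = pvKeySums ps) :
    (pvCounterAdd acc d).items = pvKeySums (ps ++ [d]) := by
  have hkeys : acc.keys = pvColKeys ps := by
    have h := congrArg (List.map (fun p : String × Int => p.1)) hacc
    simp only [pvKeySums, List.map_map, Function.comp_def] at h
    simpa [PySem.Dict.keys] using h
  have hndacc : acc.keys.Nodup := by
    rw [hkeys]; unfold pvColKeys; exact PySem.List.nodup_dedup _
  have hndacc' : (acc.items.map (·.1)).Nodup := by
    simpa [PySem.Dict.keys] using hndacc
  unfold pvCounterAdd
  have h1 : (acc.items.foldl (fun r kv => r.insert kv.1 (kv.2 + d.getD kv.1 0)) PySem.Dict.empty).items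
      = acc.items.map (fun kv => (kv.1, kv.2 + d.getD kv.1 0)) := by
    rw [PySem.Dict.items_foldl_insert_fresh acc.items (·.1) (fun kv => kv.2 + d.getD kv.1 0)
      PySem.Dict.empty (fun a _ => by simp) hndacc']
    rfl
  set r1 := acc.items.foldl (fun r kv => r.insert kv.1 (kv.2 + d.getD kv.1 0)) PySem.Dict.empty with hr1
  have hk1 : r1.keys = acc.keys := by
    simp [PySem.Dict.keys, h1, List.map_map, Function.comp]
  have hdk : (d.items.map (·.1)).Nodup := by
    simpa [PySem.Dict.keys] using hd
  rw [foldl_cond_insert acc d.items r1 hdk ?_]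
  · rw [h1, hacc]
    have hsplit : pvColKeys (ps ++ [d])
        = pvColKeys ps ++ d.keys.filter (fun y => !(PySem.Set.contains (pvColKeys ps) y)) := by
      unfold pvColKeys
      rw [List.flatMap_append]
      simp only [List.flatMap_cons, List.flatMap_nil, List.append_nil]
      rw [PySem.List.dedup_eq_ofList, PySem.List.dedup_eq_ofList, PySem.Set.ofList_append,
        PySem.Set.update_eq_append_filter, PySem.Set.ofList_eq_self_of_nodup d.keys hd]
    simp only [pvKeySums]
    rw [hsplit, List.map_append]
    congr 1
    · rw [List.map_map]
      apply List.map_congr_left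
      intro k _
      simp
    · rw [PySem.Dict.items_eq_map_keys d hd 0, List.filter_map]
      have hfc : ∀ k ∈ d.keys,
          ((fun p => !acc.contains p.1) ∘ (fun k => (k, d.getD k 0))) k
            = (fun y => !(PySem.Set.contains (pvColKeys ps) y)) k := by
        intro k _
        simp only [Function.comp_apply]
        rw [PySem.Dict.contains_eq_decide_mem_keys, hkeys,
          PySem.Set.contains_eq_listContains]
        simp [List.contains_eq_mem]
      rw [List.filter_congr hfc]
      apply List.map_congr_left
      intro k hk
      have h2 := (List.mem_filter.1 hk).2
      simp only [PySem.Set.contains_eq_listContains, Bool.not_eq_eq_eq_not, Bool.not_true,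
        List.contains_eq_mem, decide_eq_false_iff_not] at h2
      have hmem : k ∉ ps.flatMap PySem.Dict.keys := by
        intro hm
        exact h2 (by simpa [pvColKeys, PySem.List.mem_dedup] using hm)
      simp [colSum_eq_zero ps k hmem]
  · intro p hp hcp
    rw [PySem.Dict.contains_eq_decide_mem_keys, hk1]
    rw [PySem.Dict.contains_eq_decide_mem_keys] at hcp
    exact hcp

theorem foldl_counterAdd (cs : List (PySem.Dict String Int)) :
    ∀ (ps : List (PySem.Dict String Int)) (acc : PySem.Dict String Int),
      (∀ d ∈ cs, d.keys.Nodup) → acc.items = pvKeySums ps →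
      (cs.foldl pvCounterAdd acc).items = pvKeySums (ps ++ cs) := by
  induction cs with
  | nil => intro ps acc _ hacc; simpa using hacc
  | cons d cs ih =>
    intro ps acc hnd hacc
    simp only [List.foldl_cons]
    have h := ih (ps ++ [d]) (pvCounterAdd acc d) (fun e he => hnd e (List.mem_cons_of_mem _ he))
      (counterAdd_items acc d ps (hnd d (List.mem_cons_self ..)) hacc)
    simpa using h

theorem sum_items_eq_keySums (ads : List (PySem.Dict String Int))
    (h : ∀ d ∈ ads, d.keys.Nodup) :
    (pvSumArrayDicts ads).items = pvKeySums ads := by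
  match ads with
  | [] => rfl
  | c :: cs =>
    have hc : c.keys.Nodup := h c (List.mem_cons_self ..)
    have hbase : c.items = pvKeySums [c] := by
      simp only [pvKeySums]
      rw [show pvColKeys [c] = c.keys from by
          simp [pvColKeys, PySem.Set.ofList_eq_self_of_nodup c.keys hc],
        PySem.Dict.items_eq_map_keys c hc 0]
      apply List.map_congr_left
      intro k _
      simp
    have h2 := foldl_counterAdd cs [c] c (fun d hd => h d (List.mem_cons_of_mem _ hd)) hbase
    simpa [pvSumArrayDicts] using h2

-- ===== VERDICT (by name: the statement is the Claim_ definition above) =====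
theorem get_summary_group_lessons_results_spec : Claim_equal_get_summary_group_lessons_results := by
  intro g _ _
  unfold Spec_get_summary_group_lessons_results
  unfold get_summary_group_lessons_results get_summary_group_lessons_results_alt
  refine List.map_congr_left ?_
  intro p hp
  refine congrArg (Prod.mk p.1) (List.map_congr_left ?_)
  intro q hq
  exact congrArg (Prod.mk q.1) (sum_items_eq_keySums q.2 (fun d hd => nodup_inner g p hp q hq d hd))
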